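-- pv_equiv track=rewrite | github.com/Zhengxian-Fan/rp | ModelPkg/utils.py | seq_padding_reverse
-- ===== SOURCE A (Python) =====
-- def seq_padding_reverse(tokens, max_len, token2idx=None, symbol=None):
--     if symbol is None:
--         symbol = 'PAD'
--
--     seq = []
--     token_len = len(tokens)
--     tokens = tokens[::-1]
--     for i in range(max_len):
--         if token2idx is None:
--             if i < token_len:
--                 seq.append(tokens[i])
--             else:
--                 seq.append(symbol)
--         else:
--             if i < token_len:
--                 # 1 indicate UNK
--                 seq.append(token2idx.get(tokens[i], token2idx['UNK']))
--             else:
--                 seq.append(token2idx.get(symbol))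
--     return seq[::-1]
-- ===== SOURCE B (Python) =====
-- def seq_padding_reverse(tokens, max_len, token2idx=None, symbol=None):
--     if symbol is None:
--         symbol = 'PAD'
--     if max_len <= 0:
--         return []
--     kept = tokens[max(0, len(tokens) - max_len):]
--     pad_count = max_len - len(kept)
--     if token2idx is None:
--         return [symbol] * pad_count + list(kept)
--     unk = token2idx.get('UNK')
--     return [token2idx.get(symbol)] * pad_count + [token2idx.get(t, unk) for t in kept]
-- ===== Notes on version B (the rewrite author's own statement) =====
-- stated objective: simpler
-- what changed: Replaces A's double reversal plus an index loop over range(max_len) with a direct construction: one slice keeps the last min(len,max_len) tokens in order and the result is the pad segment concatenated with their mapping; Python B reproduces A exactly on every input A returns on (including token2idx=None), and Pre_ only excludes inputs where A raises or the returned value is not a list of ints and hence outside the declared Lean return type List Int.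
-- outside the precondition, e.g. on seq_padding_reverse(['a', 'b'], 3, None, None): A returns ['PAD', 'a', 'b'], B returns ['PAD', 'a', 'b']; on seq_padding_reverse(['a'], 2, {'a': 1}, None): A raises KeyError, B returns [None, 1]; on seq_padding_reverse([], 2, {'UNK': 9}, None): A returns [None, None], B returns [None, None]
import Mathlib
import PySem

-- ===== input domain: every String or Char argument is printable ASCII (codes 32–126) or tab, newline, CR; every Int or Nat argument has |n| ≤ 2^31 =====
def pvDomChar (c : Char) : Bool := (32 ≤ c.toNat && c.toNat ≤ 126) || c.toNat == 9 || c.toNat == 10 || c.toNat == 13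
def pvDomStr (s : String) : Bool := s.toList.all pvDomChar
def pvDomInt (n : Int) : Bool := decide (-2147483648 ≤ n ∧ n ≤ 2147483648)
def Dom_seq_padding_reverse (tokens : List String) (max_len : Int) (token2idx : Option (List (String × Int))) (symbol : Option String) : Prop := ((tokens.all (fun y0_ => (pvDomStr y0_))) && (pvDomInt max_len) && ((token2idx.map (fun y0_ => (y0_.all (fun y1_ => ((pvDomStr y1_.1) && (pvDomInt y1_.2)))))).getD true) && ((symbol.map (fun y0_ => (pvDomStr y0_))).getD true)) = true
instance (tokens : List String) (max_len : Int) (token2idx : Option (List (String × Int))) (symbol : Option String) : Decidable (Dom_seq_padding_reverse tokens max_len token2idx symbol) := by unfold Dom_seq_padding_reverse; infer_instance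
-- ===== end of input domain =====

-- B replaces A's double reversal and index loop with a slice of the last tokens plus a pad-segment
-- concatenation (simpler decomposition, same cost); Python B reproduces A's return value on every
-- input A returns on, including the token2idx=None string-output mode (outside the List Int type).


-- ===== PORT A =====
def seq_padding_reverse (tokens : List String) (max_len : Int) (token2idx : Option (List (String × Int))) (symbol : Option String) : List Int :=
  let symbol := symbol.getD "PAD"
  let token_len : Int := tokens.length
  let rev := (PySem.List.slice? tokens none none (-1)).getD []   -- tokens[::-1]
  match token2idx with
  | none =>
    -- Python appends the raw token/symbol strings here: the result is a list of strings, not of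
    -- ints, so it cannot be a value of the declared return type List Int; excluded by Pre_
    -- (the Python B reproduces A's string list on these inputs).
    []
  | some l =>
    let d := PySem.Dict.mk l
    let seq := (PySem.List.pyRange 0 max_len 1).foldl (fun seq i =>
      if i < token_len then
        -- token2idx.get(tokens[i], token2idx['UNK']); the eager ['UNK'] lookup raises when absent (excluded by Pre_)
        seq ++ [(d.get? (PySem.List.pyGetD rev i "")).getD ((d.get? "UNK").getD 0)]
      else
        -- token2idx.get(symbol); returns None (not an int) when absent (excluded by Pre_)
        seq ++ [(d.get? symbol).getD 0]) []
    (PySem.List.slice? seq none none (-1)).getD []   -- seq[::-1]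


-- ===== PORT B =====
def seq_padding_reverse_alt (tokens : List String) (max_len : Int) (token2idx : Option (List (String × Int))) (symbol : Option String) : List Int :=
  let symbol := symbol.getD "PAD"
  if max_len ≤ 0 then [] else
  let kept := PySem.List.slice tokens (some (max 0 ((tokens.length : Int) - max_len))) none
  let pad_count : Int := max_len - kept.length
  match token2idx with
  | none =>
    -- Python B returns [symbol]*pad_count + kept, a list of strings identical to A's; outside
    -- the declared return type List Int, excluded by Pre_.
    []
  | some l =>
    let d := PySem.Dict.mk l
    let unk := d.get? "UNK"
    List.replicate pad_count.toNat ((d.get? symbol).getD 0) ++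
      kept.map (fun t => (d.get? t).getD (unk.getD 0))


-- ===== PRECONDITION & SPEC =====
-- Pre_ excludes only inputs where A's value cannot be stated at type List Int: token2idx=None
-- (A returns a list of STRINGS — the Python B returns the identical string list there, but a
-- List Int theorem cannot say so); a missing 'UNK' key while any token is consumed (A raises
-- KeyError via the eagerly evaluated default); and a missing pad-symbol key while padding occurs
-- (A's list contains None elements, not ints — B again matches A in Python).
def Pre_seq_padding_reverse (tokens : List String) (max_len : Int) (token2idx : Option (List (String × Int))) (symbol : Option String) : Prop :=
  token2idx ≠ none ∧
  (0 < max_len ∧ tokens ≠ [] → "UNK" ∈ (token2idx.getD []).map Prod.fst) ∧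
  ((tokens.length : Int) < max_len → (symbol.getD "PAD") ∈ (token2idx.getD []).map Prod.fst)
instance (tokens : List String) (max_len : Int) (token2idx : Option (List (String × Int))) (symbol : Option String) : Decidable (Pre_seq_padding_reverse tokens max_len token2idx symbol) := by unfold Pre_seq_padding_reverse; infer_instance
def pvWitness_seq_padding_reverse : List String × Int × (Option (List (String × Int))) × Option String :=
  (["a", "b"], 4, some [("a", 1), ("b", 2), ("UNK", 9), ("PAD", 0)], none)
def Spec_seq_padding_reverse (tokens : List String) (max_len : Int) (token2idx : Option (List (String × Int))) (symbol : Option String) (out : List Int) : Prop := out = seq_padding_reverse_alt tokens max_len token2idx symbol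
instance (tokens : List String) (max_len : Int) (token2idx : Option (List (String × Int))) (symbol : Option String) (out : List Int) : Decidable (Spec_seq_padding_reverse tokens max_len token2idx symbol out) := by unfold Spec_seq_padding_reverse; infer_instance

-- ===== CLAIM (what is proved, stated in full; the proofs are below) =====
def Claim_equal_seq_padding_reverse : Prop := ∀ (tokens : List String) (max_len : Int) (token2idx : Option (List (String × Int))) (symbol : Option String), Dom_seq_padding_reverse tokens max_len token2idx symbol → Pre_seq_padding_reverse tokens max_len token2idx symbol → Spec_seq_padding_reverse tokens max_len token2idx symbol (seq_padding_reverse tokens max_len token2idx symbol)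

-- ===== LEMMAS AND PROOFS =====

-- The reversed index-loop output equals pad-segment ++ mapped last-tokens segment.
lemma pv_core (xs : List String) (n : Int) (f : String → Int) (p : Int) (hn : 0 < n)
    (a : Nat) (ha : a = (max 0 ((xs.length : Int) - n)).toNat) :
    ((PySem.List.pyRange 0 n 1).map
        (fun i => if i < (xs.length : Int) then f (PySem.List.pyGetD xs.reverse i "") else p)).reverse
      = List.replicate (n - ((xs.drop a).length : Int)).toNat p ++ (xs.drop a).map f := by
  apply List.ext_getElem
  · simp [PySem.List.length_pyRange_one]
    omega
  · intro j h1 h2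
    simp only [List.getElem_reverse, List.length_map, PySem.List.length_pyRange_one,
      List.getElem_map, PySem.List.getElem_pyRange_one, zero_add, Int.sub_zero]
    set N := n.toNat with hN
    set L := xs.length with hL
    have haN : a = L - N := by omega
    have hjN : j < N := by
      simp [PySem.List.length_pyRange_one] at h1; omega
    by_cases hpad : j < N - (L - a)
    · -- pad zone
      have hc : ¬ (((N - 1 - j : Nat) : Int) < (L : Int)) := by omega
      rw [if_neg hc, List.getElem_append_left (by simp; omega), List.getElem_replicate]
    · -- token zone
      have hc : (((N - 1 - j : Nat) : Int) < (L : Int)) := by omega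
      rw [if_pos hc]
      have hrange : ((N - 1 - j : Nat) : Int) < (xs.reverse.length : Int) := by
        simpa using hc
      rw [PySem.List.pyGetD_eq_getElem _ _ (Int.natCast_nonneg _) hrange]
      have hlrep : (List.replicate ((n : Int) - ((xs.drop a).length : Int)).toNat p).length
          = N - (L - a) := by simp; omega
      rw [List.getElem_append_right (by omega)]
      simp only [List.getElem_map, List.getElem_drop, List.getElem_reverse, hlrep]
      congr 1
      congr 1
      simp only [Int.toNat_natCast]
      omega

-- The append-in-branches loop body is an append of a branched singleton; the fold is a map.
lemma pv_fold_map (tokens : List String) (n : Int) (d : PySem.Dict String Int) (u p : Int) :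
    (PySem.List.pyRange 0 n 1).foldl
        (fun seq i => if i < (tokens.length : Int)
          then seq ++ [(d.get? (PySem.List.pyGetD tokens.reverse i "")).getD u]
          else seq ++ [p]) []
      = (PySem.List.pyRange 0 n 1).map
          (fun i => if i < (tokens.length : Int)
            then (d.get? (PySem.List.pyGetD tokens.reverse i "")).getD u else p) := by
  have hbody : (fun (seq : List Int) (i : Int) => if i < (tokens.length : Int)
          then seq ++ [(d.get? (PySem.List.pyGetD tokens.reverse i "")).getD u]
          else seq ++ [p])
      = fun (seq : List Int) (i : Int) => seq ++ [if i < (tokens.length : Int)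
          then (d.get? (PySem.List.pyGetD tokens.reverse i "")).getD u else p] := by
    funext seq i; split <;> rfl
  rw [hbody, PySem.List.foldl_append_singleton_eq_map, List.nil_append]


-- ===== VERDICT (by name: the statement is the Claim_ definition above) =====
theorem seq_padding_reverse_spec : Claim_equal_seq_padding_reverse := by
  intro tokens max_len token2idx symbol hdom hpre
  obtain ⟨hne, hunk, hpad⟩ := hpre
  unfold Spec_seq_padding_reverse
  cases token2idx with
  | none => exact absurd rfl hne
  | some l =>
    simp only [seq_padding_reverse, seq_padding_reverse_alt,
      PySem.List.slice?_none_none_neg_one, Option.getD_some]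
    by_cases hn : max_len ≤ 0
    · rw [if_pos hn, PySem.List.pyRange_one_eq_nil (by omega)]
      simp
    · rw [if_neg hn]
      rw [pv_fold_map, PySem.List.slice_from _ (le_max_left 0 _)]
      exact pv_core tokens max_len
        (fun t => (PySem.Dict.get? ⟨l⟩ t).getD ((PySem.Dict.get? ⟨l⟩ "UNK").getD 0))
        ((PySem.Dict.get? ⟨l⟩ (symbol.getD "PAD")).getD 0) (by omega) _ rfl
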